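-- pv_equiv track=rewrite | github.com/Ay-slim/alx-backend | 0x01-caching/100-lfu_cache.py | lfu_helper
-- ===== SOURCE A (Python) =====
-- def lfu_helper(access_log):
--     """Function to figure out lfu to discard"""
--     max_count_tracker = {}
--     count_tracker = 0
--     for key, val in access_log.items():
--         if val['count'] == count_tracker:
--             max_count_tracker[key] = val['time']
--         if val['count'] > count_tracker:
--             max_count_tracker = {key: val['time']}
--             count_tracker = val['count']
--     return min(max_count_tracker, key=max_count_tracker.get)
-- ===== SOURCE B (Python) =====
-- def lfu_helper(access_log):
--     """Two separate scans: first find the max count (floored at 0 like A),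
--     then a running arg-min over the times of the entries at that count."""
--     mx = 0
--     for val in access_log.values():
--         if val['count'] > mx:
--             mx = val['count']
--     best = None
--     for key, val in access_log.items():
--         if val['count'] == mx:
--             t = val['time']
--             if best is None or t < best[1]:
--                 best = (key, t)
--     return best[0]
-- ===== Notes on version B (the rewrite author's own statement) =====
-- stated objective: alternative
-- what changed: A builds a candidate dict in one interleaved scan that resets whenever a larger count appears and then calls min(dict, key=dict.get); B makes two independent scans: one to find the (zero-floored) max count, one running arg-min over the times of entries at that count, never building a dict.
-- outside the precondition, e.g. on lfu_helper({'a': {'count': 2, 'time': 1}, 'b': {'count': 1}}): A returns 'a', B returns 'a'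
import Mathlib
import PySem

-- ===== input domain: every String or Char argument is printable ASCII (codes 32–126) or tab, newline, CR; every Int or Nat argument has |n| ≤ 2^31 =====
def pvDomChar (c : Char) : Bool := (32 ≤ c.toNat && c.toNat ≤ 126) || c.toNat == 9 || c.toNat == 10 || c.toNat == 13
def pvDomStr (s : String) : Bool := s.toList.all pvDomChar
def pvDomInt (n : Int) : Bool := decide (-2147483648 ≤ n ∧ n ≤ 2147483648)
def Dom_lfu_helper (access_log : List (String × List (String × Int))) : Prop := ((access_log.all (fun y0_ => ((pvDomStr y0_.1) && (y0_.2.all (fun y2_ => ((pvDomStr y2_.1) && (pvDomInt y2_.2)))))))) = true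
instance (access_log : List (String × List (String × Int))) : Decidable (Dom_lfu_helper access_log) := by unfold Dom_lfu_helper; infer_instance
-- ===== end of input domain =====

-- B replaces A's single resetting scan (candidate dict rebuilt at each new max, then min(dict, key=get))
-- by two independent scans: a zero-floored max-count pass and a running arg-min over the candidates' times.


-- ===== PORT A =====
-- the for-loop over access_log.items(); state: (max_count_tracker, count_tracker)
def lfuA_loop : List (String × List (String × Int)) → PySem.Dict String Int → Int → PySem.Dict String Int × Int
  | [], tracker, count => (tracker, count)
  | (key, val) :: rest, tracker, count =>
      let v := PySem.Dict.ofList val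
      let c := v.getD "count" 0           -- val['count']  (present under Pre_)
      let tracker1 := if c == count then tracker.insert key (v.getD "time" 0) else tracker
      if c > count then lfuA_loop rest (PySem.Dict.mk [(key, v.getD "time" 0)]) c
      else lfuA_loop rest tracker1 count

def lfu_helper (access_log : List (String × List (String × Int))) : String :=
  let res := lfuA_loop (PySem.Dict.ofList access_log).items PySem.Dict.empty 0
  -- min(max_count_tracker, key=max_count_tracker.get); empty dict (ValueError) excluded by Pre_
  (PySem.List.min? res.1.keys (fun k => res.1.getD k 0)).getD ""

-- ===== PORT B =====
-- first pass: zero-seeded max of the counts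
def lfuB_max : List (String × List (String × Int)) → Int → Int
  | [], mx => mx
  | (_, val) :: rest, mx =>
      let c := (PySem.Dict.ofList val).getD "count" 0
      lfuB_max rest (if c > mx then c else mx)

-- second pass: running arg-min over the times of entries whose count equals mx
def lfuB_pick (mx : Int) : List (String × List (String × Int)) → Option (String × Int) → Option (String × Int)
  | [], best => best
  | (key, val) :: rest, best =>
      let v := PySem.Dict.ofList val
      if v.getD "count" 0 == mx then
        let t := v.getD "time" 0
        match best with
        | none => lfuB_pick mx rest (some (key, t))
        | some m => lfuB_pick mx rest (if t < m.2 then some (key, t) else some m)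
      else lfuB_pick mx rest best

def lfu_helper_alt (access_log : List (String × List (String × Int))) : String :=
  let items := (PySem.Dict.ofList access_log).items
  let mx := lfuB_max items 0
  match lfuB_pick mx items none with
  | some m => m.1
  | none => ""                         -- unreachable under Pre_ (B's Python raises there too)

-- ===== PRECONDITION & SPEC =====
-- Pre_ excludes inputs on which the Python A raises: an (effective, after dict-key collapse) entry
-- without 'count' (KeyError), an entry of nonnegative count without 'time' (A reads 'time' only at
-- counts at or above its nonnegative running max, so only at nonnegative counts — requiring 'time'
-- for ALL nonnegative counts is slightly wider than A's reads, see the cite), and inputs with no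
-- nonnegative count at all, where min() gets an empty dict (ValueError).
def Pre_lfu_helper (access_log : List (String × List (String × Int))) : Prop :=
  (∀ p ∈ (PySem.Dict.ofList access_log).items,
      (PySem.Dict.ofList p.2).contains "count" = true ∧
      (0 ≤ (PySem.Dict.ofList p.2).getD "count" 0 → (PySem.Dict.ofList p.2).contains "time" = true)) ∧
  (∃ p ∈ (PySem.Dict.ofList access_log).items, 0 ≤ (PySem.Dict.ofList p.2).getD "count" 0)
instance (access_log : List (String × List (String × Int))) : Decidable (Pre_lfu_helper access_log) := by unfold Pre_lfu_helper; infer_instance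

def pvWitness_lfu_helper : (List (String × List (String × Int))) :=
  [("a", [("count", 1), ("time", 2)]), ("b", [("count", 1), ("time", 0)])]

def Spec_lfu_helper (access_log : List (String × List (String × Int))) (out : String) : Prop := out = lfu_helper_alt access_log
instance (access_log : List (String × List (String × Int))) (out : String) : Decidable (Spec_lfu_helper access_log out) := by unfold Spec_lfu_helper; infer_instance

-- ===== CLAIM (what is proved, stated in full; the proofs are below) =====
def Claim_equal_lfu_helper : Prop := ∀ (access_log : List (String × List (String × Int))), Dom_lfu_helper access_log → Pre_lfu_helper access_log → Spec_lfu_helper access_log (lfu_helper access_log)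

-- ===== LEMMAS AND PROOFS =====

-- the count and time a given entry contributes
def entryC (p : String × List (String × Int)) : Int := (PySem.Dict.ofList p.2).getD "count" 0
def entryT (p : String × List (String × Int)) : Int := (PySem.Dict.ofList p.2).getD "time" 0

-- the candidate list both programs reduce to: entries at count mx, as (key, time) pairs
def candList (mx : Int) (l : List (String × List (String × Int))) : List (String × Int) :=
  (l.filter (fun p => entryC p == mx)).map (fun p => (p.1, entryT p))

theorem candList_cons (mx : Int) (p : String × List (String × Int)) (rest : List (String × List (String × Int))) :
    candList mx (p :: rest)
      = if entryC p = mx then (p.1, entryT p) :: candList mx rest else candList mx rest := by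
  simp only [candList, List.filter_cons]
  split_ifs with h <;> simp_all

theorem le_lfuB_max (l : List (String × List (String × Int))) (c : Int) : c ≤ lfuB_max l c := by
  induction l generalizing c with
  | nil => simp [lfuB_max]
  | cons p rest ih =>
      obtain ⟨k, v⟩ := p
      simp only [lfuB_max]
      split_ifs with h
      · exact le_of_lt (lt_of_lt_of_le h (ih _))
      · exact ih _

-- A's loop computes exactly the candidate list of the final (running) max
theorem lfuA_loop_items (l : List (String × List (String × Int)))
    (tr : PySem.Dict String Int) (c : Int)
    (hnd : (l.map (·.1)).Nodup)
    (hdisj : ∀ p ∈ l, tr.contains p.1 = false) :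
    (lfuA_loop l tr c).1.items
      = (if lfuB_max l c = c then tr.items else []) ++ candList (lfuB_max l c) l := by
  induction l generalizing tr c with
  | nil => simp [lfuA_loop, lfuB_max, candList]
  | cons p rest ih =>
      obtain ⟨key, val⟩ := p
      simp only [List.map_cons, List.nodup_cons] at hnd
      have hkey : key ∉ rest.map (·.1) := hnd.1
      have hmem : ∀ q ∈ rest, (q.1 == key) = false := fun q hq =>
        beq_eq_false_iff_ne.mpr (fun e => hkey (e ▸ List.mem_map_of_mem hq))
      have hmem2 : ∀ q ∈ rest, (key == q.1) = false := fun q hq =>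
        beq_eq_false_iff_ne.mpr (fun e => hkey (e.symm ▸ List.mem_map_of_mem hq))
      set cnt := (PySem.Dict.ofList val).getD "count" 0 with hcnt
      set tm := (PySem.Dict.ofList val).getD "time" 0 with htm
      have hC : entryC (key, val) = cnt := rfl
      have hT : entryT (key, val) = tm := rfl
      have hA : lfuA_loop ((key, val) :: rest) tr c
          = if cnt > c then lfuA_loop rest (PySem.Dict.mk [(key, tm)]) cnt
            else lfuA_loop rest (if cnt == c then tr.insert key tm else tr) c := rfl
      have hMx : lfuB_max ((key, val) :: rest) c = lfuB_max rest (if cnt > c then cnt else c) := rfl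
      rw [hA, hMx, candList_cons, hC, hT]
      by_cases hgt : cnt > c
      · rw [if_pos hgt, if_pos hgt]
        have hdisj' : ∀ q ∈ rest, (PySem.Dict.mk [(key, tm)]).contains q.1 = false := by
          intro q hq
          simp only [PySem.Dict.contains_mk, List.any_cons, List.any_nil, Bool.or_false]
          exact hmem2 q hq
        rw [ih _ cnt hnd.2 hdisj']
        have hMc : lfuB_max rest cnt ≠ c := by
          have := le_lfuB_max rest cnt; omega
        rw [if_neg hMc]
        by_cases hhd : cnt = lfuB_max rest cnt
        · rw [if_pos hhd, if_pos hhd.symm]; try simp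
        · rw [if_neg hhd, if_neg (fun e => hhd e.symm)]; try simp
      · rw [if_neg hgt, if_neg hgt]
        by_cases heq : cnt = c
        · rw [if_pos (beq_iff_eq.mpr heq)]
          set tr' := tr.insert key tm with htr'
          have hdisj' : ∀ q ∈ rest, tr'.contains q.1 = false := by
            intro q hq
            rw [htr', PySem.Dict.contains_insert, hmem q hq,
                hdisj q (List.mem_cons_of_mem _ hq), Bool.or_false]
          rw [ih tr' c hnd.2 hdisj']
          have hins : tr'.items = tr.items ++ [(key, tm)] :=
            PySem.Dict.items_insert_of_not_contains tr _ (hdisj (key, val) List.mem_cons_self)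
          by_cases hMc : lfuB_max rest c = c
          · rw [if_pos hMc, if_pos hMc, if_pos (heq.trans hMc.symm), hins]
            simp
          · rw [if_neg hMc, if_neg hMc, if_neg (show ¬(cnt = lfuB_max rest c) by omega)]
            try simp
        · rw [if_neg (by simpa using heq)]
          rw [ih tr c hnd.2 (fun q hq => hdisj q (List.mem_cons_of_mem _ hq))]
          have hne : cnt ≠ lfuB_max rest c := by
            have := le_lfuB_max rest c; omega
          rw [if_neg hne]

-- first-match lookup in a dict with distinct keys returns the pair's own value
theorem getD_mk_of_mem (q : List (String × Int)) (hq : (q.map (·.1)).Nodup)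
    (p : String × Int) (hp : p ∈ q) : (PySem.Dict.mk q).getD p.1 0 = p.2 := by
  induction q with
  | nil => cases hp
  | cons h t ih =>
      obtain ⟨k1, v1⟩ := h
      simp only [List.map_cons, List.nodup_cons] at hq
      rcases List.mem_cons.mp hp with rfl | hpt
      · simp [PySem.Dict.getD, PySem.Dict.get?_mk_cons]
      · have hne : (k1 == p.1) = false :=
          beq_eq_false_iff_ne.mpr (fun e => hq.1 (e ▸ List.mem_map_of_mem hpt))
        simp only [PySem.Dict.getD, PySem.Dict.get?_mk_cons, hne, Bool.false_eq_true, if_false]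
        exact ih hq.2 hpt

-- the shared "running arg-min" step, once over pairs and once over keys through a lookup f
def pickStep : Option (String × Int) → (String × Int) → Option (String × Int)
  | none, x => some x
  | some m, x => if x.2 < m.2 then some x else some m

def keyStep (f : String → Int) : Option String → String → Option String
  | none, x => some x
  | some m, x => if f x < f m then some x else some m

theorem min?_snd_eq_foldl (q : List (String × Int)) :
    PySem.List.min? q (fun x => x.2) = q.foldl pickStep none := by
  simp only [PySem.List.min?]
  congr 1
  funext acc x
  cases acc <;> rfl

theorem min?_key_eq_foldl (ks : List String) (f : String → Int) :
    PySem.List.min? ks f = ks.foldl (keyStep f) none := by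
  simp only [PySem.List.min?]
  congr 1
  funext acc x
  cases acc <;> rfl

-- fold form of "min over keys with a lookup key-function = fst of min over pairs by snd"
theorem foldl_keyed (q : List (String × Int)) (f : String → Int)
    (hf : ∀ p ∈ q, f p.1 = p.2) (aB : Option (String × Int))
    (hB : ∀ r, aB = some r → f r.1 = r.2) :
    List.foldl (keyStep f) (Option.map (·.1) aB) (q.map (·.1))
      = Option.map (·.1) (List.foldl pickStep aB q) := by
  induction q generalizing aB with
  | nil => simp
  | cons p t ih =>
      have hfp : f p.1 = p.2 := hf p List.mem_cons_self
      have hf' : ∀ r ∈ t, f r.1 = r.2 := fun r hr => hf r (List.mem_cons_of_mem _ hr)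
      cases aB with
      | none =>
          simpa [keyStep, pickStep] using
            ih hf' (some p) (fun r hr => by cases Option.some.inj hr; exact hfp)
      | some m =>
          have hfm : f m.1 = m.2 := hB m rfl
          simp only [List.map_cons, List.foldl_cons, Option.map_some, keyStep, pickStep, hfp, hfm]
          by_cases hlt : p.2 < m.2
          · rw [if_pos hlt, if_pos hlt]
            exact ih hf' (some p) (fun r hr => by cases Option.some.inj hr; exact hfp)
          · rw [if_neg hlt, if_neg hlt]
            exact ih hf' (some m) (fun r hr => by cases Option.some.inj hr; exact hfm)

theorem min?_keyed (q : List (String × Int)) (f : String → Int)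
    (hf : ∀ p ∈ q, f p.1 = p.2) :
    PySem.List.min? (q.map (·.1)) f = Option.map (·.1) (PySem.List.min? q (fun x => x.2)) := by
  rw [min?_snd_eq_foldl, min?_key_eq_foldl]
  simpa using foldl_keyed q f hf none (fun r hr => by cases hr)

-- B's second pass is a left fold of the min step over the candidate list
theorem lfuB_pick_foldl (mx : Int) (l : List (String × List (String × Int)))
    (best : Option (String × Int)) :
    lfuB_pick mx l best = List.foldl pickStep best (candList mx l) := by
  induction l generalizing best with
  | nil => simp [lfuB_pick, candList]
  | cons p rest ih =>
      obtain ⟨key, val⟩ := p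
      rw [candList_cons]
      simp only [lfuB_pick]
      by_cases hc : entryC (key, val) = mx
      · have hbeq : ((PySem.Dict.ofList val).getD "count" 0 == mx) = true := beq_iff_eq.mpr hc
        rw [if_pos hc]
        simp only [hbeq, if_pos, List.foldl_cons]
        cases best with
        | none => exact ih _
        | some m => exact ih _
      · have hbeq : ((PySem.Dict.ofList val).getD "count" 0 == mx) = false := beq_eq_false_iff_ne.mpr hc
        rw [if_neg hc]
        simp only [hbeq, Bool.false_eq_true, if_false]
        exact ih _

theorem lfuB_pick_eq (mx : Int) (l : List (String × List (String × Int))) :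
    lfuB_pick mx l none = PySem.List.min? (candList mx l) (fun x => x.2) := by
  rw [lfuB_pick_foldl, min?_snd_eq_foldl]

theorem ofList_keys_nodup (l : List (String × List (String × Int))) :
    (((PySem.Dict.ofList l).items).map (·.1)).Nodup := by
  simpa [PySem.Dict.keys] using PySem.Dict.nodup_keys_ofList l

-- ===== VERDICT (by name: the statement is the Claim_ definition above) =====
theorem lfu_helper_spec : Claim_equal_lfu_helper := by
  intro l _ _
  unfold Spec_lfu_helper lfu_helper lfu_helper_alt
  dsimp only
  have hnd := ofList_keys_nodup l
  have hloop := lfuA_loop_items ((PySem.Dict.ofList l).items) PySem.Dict.empty 0 hnd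
    (fun p _ => PySem.Dict.contains_empty p.1)
  have hitems : (lfuA_loop ((PySem.Dict.ofList l).items) PySem.Dict.empty 0).1.items
      = candList (lfuB_max ((PySem.Dict.ofList l).items) 0) ((PySem.Dict.ofList l).items) := by
    rw [hloop]; split <;> simp [PySem.Dict.empty]
  have hdict : (lfuA_loop ((PySem.Dict.ofList l).items) PySem.Dict.empty 0).1
      = PySem.Dict.mk (candList (lfuB_max ((PySem.Dict.ofList l).items) 0) ((PySem.Dict.ofList l).items)) :=
    PySem.Dict.ext hitems
  have hclnd : ((candList (lfuB_max ((PySem.Dict.ofList l).items) 0) ((PySem.Dict.ofList l).items)).map (·.1)).Nodup := by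
    have hsub : ((candList (lfuB_max ((PySem.Dict.ofList l).items) 0) ((PySem.Dict.ofList l).items)).map (·.1)).Sublist
        (((PySem.Dict.ofList l).items).map (·.1)) := by
      simp only [candList, List.map_map]
      exact List.Sublist.map _ List.filter_sublist
    exact hnd.sublist hsub
  have hf : ∀ p ∈ candList (lfuB_max ((PySem.Dict.ofList l).items) 0) ((PySem.Dict.ofList l).items),
      ((lfuA_loop ((PySem.Dict.ofList l).items) PySem.Dict.empty 0).1.getD p.1 0) = p.2 := by
    intro p hp
    rw [hdict]
    exact getD_mk_of_mem _ hclnd p hp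
  have hkeys : (lfuA_loop ((PySem.Dict.ofList l).items) PySem.Dict.empty 0).1.keys
      = (candList (lfuB_max ((PySem.Dict.ofList l).items) 0) ((PySem.Dict.ofList l).items)).map (·.1) := by
    simp [PySem.Dict.keys, hitems]
  rw [hkeys, min?_keyed _ _ hf, lfuB_pick_eq]
  cases PySem.List.min? (candList (lfuB_max ((PySem.Dict.ofList l).items) 0) ((PySem.Dict.ofList l).items)) (fun x => x.2) <;> rfl
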